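-- pv_equiv track=rewrite | github.com/basketdump/ProjectEuler | Problem_1.py | get_multiples_below
-- ===== SOURCE A (Python) =====
-- def get_multiples_below(factors, max_value):
--     '''returns a list of numbers that are
--     below max_value and multiples of factor(s)'''
--     multiples = []
--     for i in range(1, max_value):
--         for factor in factors:
--             if i % factor == 0:
--                 multiples.append(i)
--                 break
--     return multiples
-- ===== SOURCE B (Python) =====
-- def get_multiples_below(factors, max_value):
--     '''returns a list of numbers that are
--     below max_value and multiples of factor(s)'''
--     hits = set()
--     for factor in factors:
--         g = abs(factor)
--         if g > 0:
--             hits.update(range(g, max_value, g))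
--     return sorted(hits)
-- ===== Notes on version B (the rewrite author's own statement) =====
-- stated objective: faster
-- what changed: Instead of scanning every integer in range(1, max_value) and testing each against every factor, B generates the multiples of each factor directly with range(|f|, max_value, |f|), collects them in a set and returns them sorted.
-- outside the precondition, e.g. on get_multiples_below([1, 0], 3): A returns [1, 2], B returns [1, 2]
import Mathlib
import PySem

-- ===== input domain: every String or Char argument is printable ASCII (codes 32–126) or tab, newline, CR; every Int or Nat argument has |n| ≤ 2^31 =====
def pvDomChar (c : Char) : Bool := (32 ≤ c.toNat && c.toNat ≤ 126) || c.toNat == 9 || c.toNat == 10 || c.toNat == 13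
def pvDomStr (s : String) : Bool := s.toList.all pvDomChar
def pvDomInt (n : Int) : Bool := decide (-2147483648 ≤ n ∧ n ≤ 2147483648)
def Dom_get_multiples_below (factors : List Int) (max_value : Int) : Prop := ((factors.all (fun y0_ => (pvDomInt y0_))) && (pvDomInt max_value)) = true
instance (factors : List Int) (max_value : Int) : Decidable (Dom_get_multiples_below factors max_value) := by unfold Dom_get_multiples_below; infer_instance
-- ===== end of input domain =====

-- B enumerates the multiples of each factor directly (range(|f|, max_value, |f|) into a set,
-- then sorted) instead of testing every integer below max_value against every factor.

-- ===== PORT A =====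
-- inner 'for factor in factors: if i % factor == 0: append; break' — the break makes it
-- a first-divisor search returning whether any factor divides i
def pvAnyDiv (i : Int) (factors : List Int) : Bool :=
  match factors with
  | [] => false
  | f :: rest => if PySem.Int.mod i f == 0 then true else pvAnyDiv i rest

def get_multiples_below (factors : List Int) (max_value : Int) : List Int :=
  (PySem.List.pyRange 1 max_value 1).foldl
    (fun multiples i => if pvAnyDiv i factors then multiples ++ [i] else multiples) []

-- ===== PORT B =====
def get_multiples_below_alt (factors : List Int) (max_value : Int) : List Int :=
  PySem.List.sorted
    (factors.foldl
      (fun hits factor =>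
        let g := |factor|
        if 0 < g then PySem.Set.update hits (PySem.List.pyRange g max_value g) else hits)
      PySem.Set.empty)
    (fun x => x)

-- ===== PRECONDITION & SPEC =====
-- Pre_ excludes factor lists containing 0 (unless range(1, max_value) is empty): there the
-- Python A raises ZeroDivisionError as soon as some i reaches the 0 before a dividing factor;
-- on the few such inputs where an earlier factor always divides first, A still returns (see cites).
def Pre_get_multiples_below (factors : List Int) (max_value : Int) : Prop :=
  (0 : Int) ∉ factors ∨ max_value ≤ 1
instance (factors : List Int) (max_value : Int) : Decidable (Pre_get_multiples_below factors max_value) := by unfold Pre_get_multiples_below; infer_instance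

def pvWitness_get_multiples_below : List Int × Int := ([3, 5], 16)

def Spec_get_multiples_below (factors : List Int) (max_value : Int) (out : List Int) : Prop := out = get_multiples_below_alt factors max_value
instance (factors : List Int) (max_value : Int) (out : List Int) : Decidable (Spec_get_multiples_below factors max_value out) := by unfold Spec_get_multiples_below; infer_instance

-- ===== CLAIM (what is proved, stated in full; the proofs are below) =====
def Claim_equal_get_multiples_below : Prop := ∀ (factors : List Int) (max_value : Int), Dom_get_multiples_below factors max_value → Pre_get_multiples_below factors max_value → Spec_get_multiples_below factors max_value (get_multiples_below factors max_value)

-- ===== LEMMAS AND PROOFS =====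

-- Python's i % f == 0 is exactly divisibility (holds for f = 0 too: fmod i 0 = i)
theorem pv_fmod_eq_zero_iff (a b : Int) : a.fmod b = 0 ↔ b ∣ a := by
  rw [Int.fmod_eq_emod]
  by_cases h : b ∣ a
  · simp [h, Int.emod_eq_zero_of_dvd h]
  · have hne : a % b ≠ 0 := fun hz => h (Int.dvd_iff_emod_eq_zero.mpr hz)
    split_ifs with hc
    · simp only [add_zero, h, iff_false]; exact hne
    · rcases not_or.mp hc with ⟨hb, _⟩
      have hblt : b < 0 := by omega
      have hb0 : b ≠ 0 := by omega
      have h1 : 0 ≤ a % b := Int.emod_nonneg a hb0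
      have h2 : a % b < -b := by
        have := Int.emod_lt_of_pos a (b := -b) (by omega)
        simpa [Int.emod_neg] using this
      simp only [h, iff_false]
      omega

theorem pvAnyDiv_eq_any (i : Int) (factors : List Int) :
    pvAnyDiv i factors = factors.any (fun f => decide (f ∣ i)) := by
  induction factors with
  | nil => rfl
  | cons f rest ih =>
      simp only [pvAnyDiv, List.any_cons, PySem.Int.mod, beq_iff_eq]
      by_cases h : i.fmod f = 0
      · simp [h, (pv_fmod_eq_zero_iff i f).mp h]
      · have : ¬ f ∣ i := fun hd => h ((pv_fmod_eq_zero_iff i f).mpr hd)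
        simp [h, this, ih]

-- membership in the set built by B's fold
theorem pv_mem_fold (factors : List Int) (max_value : Int) (s : PySem.Set Int) (x : Int) :
    x ∈ factors.foldl
      (fun hits factor =>
        let g := |factor|
        if 0 < g then PySem.Set.update hits (PySem.List.pyRange g max_value g) else hits)
      s ↔ x ∈ s ∨ ∃ f ∈ factors, 0 < |f| ∧ x ∈ PySem.List.pyRange |f| max_value |f| := by
  induction factors generalizing s with
  | nil => simp
  | cons f rest ih =>
      simp only [List.foldl_cons, List.mem_cons]
      rw [ih]
      by_cases h : 0 < |f|
      · simp only [h, if_true, PySem.Set.mem_update]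
        constructor
        · rintro ((hs | hr) | ⟨g, hg, h1, h2⟩)
          · exact Or.inl hs
          · exact Or.inr ⟨f, Or.inl rfl, h, hr⟩
          · exact Or.inr ⟨g, Or.inr hg, h1, h2⟩
        · rintro (hs | ⟨g, (rfl | hg), h1, h2⟩)
          · exact Or.inl (Or.inl hs)
          · exact Or.inl (Or.inr h2)
          · exact Or.inr ⟨g, hg, h1, h2⟩
      · simp only [h, if_false]
        constructor
        · rintro (hs | ⟨g, hg, h1, h2⟩)
          · exact Or.inl hs
          · exact Or.inr ⟨g, Or.inr hg, h1, h2⟩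
        · rintro (hs | ⟨g, (rfl | hg), h1, h2⟩)
          · exact Or.inl hs
          · exact absurd h1 h
          · exact Or.inr ⟨g, hg, h1, h2⟩

theorem pv_nodup_fold (factors : List Int) (max_value : Int) (s : PySem.Set Int)
    (hs : s.Nodup) :
    (factors.foldl
      (fun hits factor =>
        let g := |factor|
        if 0 < g then PySem.Set.update hits (PySem.List.pyRange g max_value g) else hits)
      s).Nodup := by
  induction factors generalizing s with
  | nil => exact hs
  | cons f rest ih =>
      simp only [List.foldl_cons]
      apply ih
      by_cases h : 0 < |f|
      · simpa [h] using PySem.Set.nodup_update s _ hs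
      · simpa [h] using hs

-- the pointwise equivalence: i is appended by A iff i lands in B's set
theorem pv_mem_iff (factors : List Int) (max_value : Int) (i : Int)
    (h1 : 1 ≤ i) (h2 : i < max_value) :
    pvAnyDiv i factors = true ↔
      ∃ f ∈ factors, 0 < |f| ∧ i ∈ PySem.List.pyRange |f| max_value |f| := by
  rw [pvAnyDiv_eq_any]
  simp only [List.any_eq_true, decide_eq_true_eq]
  constructor
  · rintro ⟨f, hf, hd⟩
    have hpos : 0 < |f| := by
      rcases eq_or_ne f 0 with rfl | hne
      · rcases hd with ⟨c, hc⟩; omega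
      · exact abs_pos.mpr hne
    have hd' : |f| ∣ i := (abs_dvd f i).mpr hd
    refine ⟨f, hf, hpos, ?_⟩
    rw [PySem.List.mem_pyRange_iff_of_pos hpos]
    exact ⟨Int.le_of_dvd (by omega) hd', h2, dvd_sub hd' dvd_rfl⟩
  · rintro ⟨f, hf, hpos, hmem⟩
    rw [PySem.List.mem_pyRange_iff_of_pos hpos] at hmem
    refine ⟨f, hf, (abs_dvd f i).mp ?_⟩
    have := dvd_add hmem.2.2 (dvd_refl |f|)
    simpa using this

-- ===== VERDICT (by name: the statement is the Claim_ definition above) =====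
theorem get_multiples_below_spec : Claim_equal_get_multiples_below := by
  intro factors max_value _ _
  unfold Spec_get_multiples_below get_multiples_below get_multiples_below_alt
  rw [PySem.List.foldl_append_if_eq_filter, List.nil_append]
  symm
  apply PySem.List.sorted_eq_of_perm_of_pairwise_lt
  · rw [List.perm_ext_iff_of_nodup
      ((PySem.List.nodup_pyRange_one 1 max_value).filter _)
      (pv_nodup_fold factors max_value PySem.Set.empty List.nodup_nil)]
    intro x
    rw [List.mem_filter, PySem.List.mem_pyRange_one, pv_mem_fold]
    constructor
    · rintro ⟨⟨hx1, hx2⟩, hp⟩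
      exact Or.inr ((pv_mem_iff factors max_value x hx1 hx2).mp hp)
    · rintro (hx | ⟨f, hf, hpos, hmem⟩)
      · simp [PySem.Set.empty] at hx
      · have := (PySem.List.mem_pyRange_iff_of_pos hpos x).mp hmem
        have hx1 : 1 ≤ x := by omega
        have hx2 : x < max_value := this.2.1
        exact ⟨⟨hx1, hx2⟩, (pv_mem_iff factors max_value x hx1 hx2).mpr ⟨f, hf, hpos, hmem⟩⟩
  · exact (PySem.List.pairwise_lt_pyRange_one 1 max_value).filter _
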